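-- pv_equiv track=rewrite | github.com/tde-nico/CyberChallenge | 2022/programmazione/ppo/my_ppo.py | ppo
-- ===== SOURCE A (Python) =====
-- def isderivable(old_password, new_password):
-- 	m, n = len(old_password), len(new_password)
-- 	if abs(m - n) > 1:
-- 		return False
--
-- 	i, j, count = 0, 0, 0
-- 	while i < m and j < n:
-- 		if old_password[i] != new_password[j]:
-- 			count += 1
-- 			if m > n:
-- 				i += 1
-- 			elif m < n:
-- 				j += 1
-- 			else:
-- 				i += 1
-- 				j += 1
-- 		else:
-- 			i += 1
-- 			j += 1
-- 	if i < m or j < n: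
-- 		count += 1
-- 	return count <= 1
--
-- def ppo(pas, old):
-- 	if 8 > len(pas) > 16:
-- 		return 0
-- 	flags = [0,0,0,0] #lower upper, digit, special
-- 	previous = ""
-- 	for char in pas:
-- 		if char.islower():
-- 			flags[0] = 1
-- 		elif char.isupper():
-- 			flags[1] = 1
-- 		elif char.isdigit():
-- 			flags[2] = 1
-- 		else:
-- 			flags[3] = 1
-- 		if char == previous:
-- 			return 0
-- 		previous = char
-- 	if not all(flags):
-- 		return 0
-- 	if isderivable(pas, old):
-- 		return 0
-- 	return 1
-- ===== SOURCE B (Python) =====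
-- def isderivable(old_password, new_password):
--     m, n = len(old_password), len(new_password)
--     if abs(m - n) > 1:
--         return False
--     # scan the common prefix to the first divergence
--     i = 0
--     while i < min(m, n) and old_password[i] == new_password[i]:
--         i += 1
--     if i == min(m, n):
--         return True  # at most one trailing insert/delete
--     if m == n:
--         return old_password[i+1:] == new_password[i+1:]  # single substitution
--     if m > n:
--         return old_password[i+1:] == new_password[i:]    # delete old[i]
--     return old_password[i:] == new_password[i+1:]        # insert new[i]
--
-- def ppo(pas, old):
--     # (the original's length guard `8 > len(pas) > 16` is unsatisfiable, hence omitted)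
--     if not (any(c.islower() for c in pas)
--             and any(c.isupper() for c in pas)
--             and any(c.isdigit() for c in pas)
--             and any(not (c.islower() or c.isupper() or c.isdigit()) for c in pas)):
--         return 0
--     if any(a == b for a, b in zip(pas, pas[1:])):
--         return 0
--     if isderivable(pas, old):
--         return 0
--     return 1
-- ===== Notes on version B (the rewrite author's own statement) =====
-- stated objective: alternative
-- what changed: isderivable is rewritten from the mismatch-counting two-pointer merge into a first-divergence scan followed by a single suffix comparison, and the flag/repeat loop with mutable state is replaced by independent any()-passes over the password (the unsatisfiable `8 > len(pas) > 16` guard is dead code and is omitted).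
import Mathlib
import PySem

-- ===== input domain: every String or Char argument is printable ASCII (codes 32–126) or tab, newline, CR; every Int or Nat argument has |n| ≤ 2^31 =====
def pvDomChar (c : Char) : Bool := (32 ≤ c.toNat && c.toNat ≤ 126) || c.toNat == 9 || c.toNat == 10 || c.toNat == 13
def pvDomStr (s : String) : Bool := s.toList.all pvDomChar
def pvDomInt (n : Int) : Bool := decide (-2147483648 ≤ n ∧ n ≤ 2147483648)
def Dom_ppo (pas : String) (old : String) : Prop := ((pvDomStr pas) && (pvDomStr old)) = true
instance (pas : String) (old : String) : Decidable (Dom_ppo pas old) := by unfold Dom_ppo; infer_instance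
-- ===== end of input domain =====

-- B rewrites isderivable as a first-divergence scan + one suffix comparison and the flag/repeat
-- loop as independent any()-passes (alternative decomposition, same cost); return values agree.

-- ===== PORT A =====

-- the two-pointer while loop of A's isderivable (m, n are the fixed original lengths)
def derivLoopA (m n : Int) (la lb : List Char) (count : Int) : Bool :=
  match la, lb with
  | x::la', y::lb' =>
      if x ≠ y then
        if m > n then derivLoopA m n la' (y::lb') (count+1)
        else if m < n then derivLoopA m n (x::la') lb' (count+1)
        else derivLoopA m n la' lb' (count+1)
      else derivLoopA m n la' lb' count
  | _, _ =>
      decide ((if la ≠ [] ∨ lb ≠ [] then count + 1 else count) ≤ 1)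
termination_by la.length + lb.length

def isderivableA (op np : List Char) : Bool :=
  let m : Int := op.length
  let n : Int := np.length
  if (m - n).natAbs > 1 then false
  else derivLoopA m n op np 0

-- A's for-loop over pas: flags + previous, early return 0 encoded as `none`
def flagsLoopA : List Char → (Int × Int × Int × Int) → Option Char → Option (Int × Int × Int × Int)
  | [], fl, _ => some fl
  | c :: cs, (f0, f1, f2, f3), prev =>
      let fl :=
        if PySem.Chars.islower c then (1, f1, f2, f3)
        else if PySem.Chars.isupper c then (f0, 1, f2, f3)
        else if PySem.Chars.isdigit c then (f0, f1, 1, f3)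
        else (f0, f1, f2, 1)
      if some c = prev then none else flagsLoopA cs fl (some c)

def ppo (pas : String) (old : String) : Int :=
  if 8 > (pas.toList.length : Int) ∧ (pas.toList.length : Int) > 16 then 0
  else
    match flagsLoopA pas.toList (0, 0, 0, 0) none with
    | none => 0
    | some (f0, f1, f2, f3) =>
        if ¬(f0 ≠ 0 ∧ f1 ≠ 0 ∧ f2 ≠ 0 ∧ f3 ≠ 0) then 0
        else if isderivableA pas.toList old.toList then 0
        else 1

-- ===== PORT B =====

-- first-divergence scan: equal prefix consumed, then one suffix comparison
def divScanB : List Char → List Char → Bool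
  | [], _ => true
  | _, [] => true
  | x::a, y::b =>
      if x = y then divScanB a b
      else if a.length = b.length then decide (a = b)
      else if a.length > b.length then decide (a = y::b)
      else decide (x::a = b)

def isderivableB (op np : List Char) : Bool :=
  if ((op.length : Int) - (np.length : Int)).natAbs > 1 then false
  else divScanB op np

def specialB (c : Char) : Bool :=
  !(PySem.Chars.islower c || PySem.Chars.isupper c || PySem.Chars.isdigit c)

def ppo_alt (pas : String) (old : String) : Int :=
  let pl := pas.toList
  if !(pl.any PySem.Chars.islower && pl.any PySem.Chars.isupper
        && pl.any PySem.Chars.isdigit && pl.any specialB) then 0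
  else if (pl.zip pl.tail).any (fun p => p.1 == p.2) then 0
  else if isderivableB pl old.toList then 0
  else 1

-- ===== PRECONDITION & SPEC =====
def Spec_ppo (pas : String) (old : String) (out : Int) : Prop := out = ppo_alt pas old
instance (pas : String) (old : String) (out : Int) : Decidable (Spec_ppo pas old out) := by unfold Spec_ppo; infer_instance

-- ===== CLAIM (what is proved, stated in full; the proofs are below) =====
def Claim_equal_ppo : Prop := ∀ (pas : String) (old : String), Dom_ppo pas old → Spec_ppo pas old (ppo pas old)

-- ===== LEMMAS AND PROOFS =====

-- one-step equations for the two-pointer loop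
theorem dA_cons (m n : Int) (x : Char) (la : List Char) (y : Char) (lb : List Char) (c : Int) :
    derivLoopA m n (x::la) (y::lb) c =
      if x ≠ y then
        if m > n then derivLoopA m n la (y::lb) (c+1)
        else if m < n then derivLoopA m n (x::la) lb (c+1)
        else derivLoopA m n la lb (c+1)
      else derivLoopA m n la lb c := by
  rw [derivLoopA.eq_def]

theorem dA_nil_left (m n : Int) (lb : List Char) (c : Int) :
    derivLoopA m n [] lb c = decide ((if lb ≠ [] then c + 1 else c) ≤ 1) := by
  rw [derivLoopA.eq_def]; cases lb <;> simp

theorem dA_cons_nil (m n : Int) (x : Char) (la : List Char) (c : Int) :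
    derivLoopA m n (x::la) [] c = decide (c + 1 ≤ 1) := by
  rw [derivLoopA.eq_def]; simp

-- once count reaches 2 the two-pointer loop can only answer false
theorem derivLoopA_ge2 (m n : Int) (la lb : List Char) (c : Int) (hc : 2 ≤ c) :
    derivLoopA m n la lb c = false := by
  revert hc
  fun_induction derivLoopA m n la lb c with
  | case1 count x la' y lb' hne hmn ih => intro hc; exact ih (by omega)
  | case2 count x la' y lb' hne hmn hmn2 ih => intro hc; exact ih (by omega)
  | case3 count x la' y lb' hne hmn hmn2 ih => intro hc; exact ih (by omega)
  | case4 count x la' y lb' hne ih => exact ih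
  | case5 la lb count hnc => intro hc; split <;> simp <;> omega

-- on equal-length remainders with count already 1, the loop answers "suffixes equal"
theorem derivLoopA_one (m n : Int) (la lb : List Char) (h : la.length = lb.length) :
    derivLoopA m n la lb 1 = decide (la = lb) := by
  induction la generalizing lb with
  | nil =>
      match lb with
      | [] => simp [dA_nil_left]
      | y :: lb' => simp at h
  | cons x la' ih =>
      match lb with
      | [] => simp at h
      | y :: lb' =>
        simp only [List.length_cons, Nat.add_right_cancel_iff] at h
        rw [dA_cons]
        by_cases hxy : x = y
        · rw [if_neg (by simpa using hxy), ih lb' h]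
          simp [hxy]
        · rw [if_pos (by simpa using hxy)]
          have hfx : decide (x :: la' = y :: lb') = false := by simp [hxy]
          rw [hfx]
          split
          · exact derivLoopA_ge2 m n la' (y :: lb') (1+1) (by omega)
          · split
            · exact derivLoopA_ge2 m n (x :: la') lb' (1+1) (by omega)
            · exact derivLoopA_ge2 m n la' lb' (1+1) (by omega)

-- equal lengths, m = n: loop from count 0 equals the first-divergence scan
theorem derivLoopA_eq (m : Int) (la lb : List Char) (h : la.length = lb.length) :
    derivLoopA m m la lb 0 = divScanB la lb := by
  induction la generalizing lb with
  | nil =>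
      match lb with
      | [] => simp [dA_nil_left, divScanB]
      | y :: lb' => simp at h
  | cons x la' ih =>
      match lb with
      | [] => simp at h
      | y :: lb' =>
        simp only [List.length_cons, Nat.add_right_cancel_iff] at h
        rw [dA_cons, divScanB]
        by_cases hxy : x = y
        · rw [if_neg (by simpa using hxy), if_pos hxy]
          exact ih lb' h
        · rw [if_pos (by simpa using hxy), if_neg hxy, if_pos h,
            if_neg (by omega), if_neg (by omega)]
          exact derivLoopA_one m m la' lb' h

-- la one longer, m > n: loop from count 0 equals the first-divergence scan
theorem derivLoopA_gt (m n : Int) (hmn : m > n) (la lb : List Char)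
    (h : la.length = lb.length + 1) :
    derivLoopA m n la lb 0 = divScanB la lb := by
  induction la generalizing lb with
  | nil => simp at h
  | cons x la' ih =>
      match lb with
      | [] =>
        rw [dA_cons_nil, divScanB.eq_def]
        simp
      | y :: lb' =>
        simp only [List.length_cons, Nat.add_right_cancel_iff] at h
        rw [dA_cons, divScanB]
        by_cases hxy : x = y
        · rw [if_neg (by simpa using hxy), if_pos hxy]
          exact ih lb' h
        · rw [if_pos (by simpa using hxy), if_neg hxy, if_pos (by omega),
            if_neg (by omega), if_pos (by omega)]
          exact derivLoopA_one m n la' (y :: lb') (by simpa using h)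

-- lb one longer, m < n: loop from count 0 equals the first-divergence scan
theorem derivLoopA_lt (m n : Int) (hmn : m < n) (la lb : List Char)
    (h : la.length + 1 = lb.length) :
    derivLoopA m n la lb 0 = divScanB la lb := by
  induction la generalizing lb with
  | nil =>
      match lb with
      | [] => simp at h
      | y :: lb' =>
        rw [dA_nil_left, divScanB.eq_def]
        simp
  | cons x la' ih =>
      match lb with
      | [] => simp at h
      | y :: lb' =>
        simp only [List.length_cons, Nat.add_right_cancel_iff] at h
        rw [dA_cons, divScanB]
        by_cases hxy : x = y
        · rw [if_neg (by simpa using hxy), if_pos hxy]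
          exact ih lb' h
        · rw [if_pos (by simpa using hxy), if_neg hxy]
          rw [if_neg (show ¬ m > n by omega), if_pos hmn]
          rw [if_neg (show ¬ la'.length = lb'.length by omega),
              if_neg (show ¬ la'.length > lb'.length by omega)]
          exact derivLoopA_one m n (x :: la') lb' (by simp; omega)

theorem isderivable_eq (op np : List Char) : isderivableA op np = isderivableB op np := by
  simp only [isderivableA, isderivableB]
  by_cases hgt : (((op.length : Int)) - (np.length : Int)).natAbs > 1
  · rw [if_pos hgt, if_pos hgt]
  · rw [if_neg hgt, if_neg hgt]
    rcases Nat.lt_trichotomy op.length np.length with hlt | heq | hgt2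
    · exact derivLoopA_lt _ _ (by exact_mod_cast hlt) op np (by omega)
    · rw [heq]
      exact derivLoopA_eq _ op np heq
    · exact derivLoopA_gt _ _ (by exact_mod_cast hgt2) op np (by omega)

-- adjacent-repeat predicate in A's `previous` form
def adjRep : Option Char → List Char → Bool
  | _, [] => false
  | prev, c :: cs => (some c == prev) || adjRep (some c) cs

theorem zip_adjRep (cs : List Char) (x : Char) :
    ((x :: cs).zip cs).any (fun p => p.1 == p.2) = adjRep (some x) cs := by
  induction cs generalizing x with
  | nil => simp [adjRep]
  | cons y ys ih =>
      have hc : (x == y) = (y == x) := by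
        by_cases h : x = y
        · subst h; rfl
        · simp [h, Ne.symm h]
      simp [adjRep, ← ih y, List.any_cons, hc]

theorem zip_adjRep' (cs : List Char) :
    (cs.zip cs.tail).any (fun p => p.1 == p.2) = adjRep none cs := by
  cases cs with
  | nil => simp [adjRep]
  | cons x xs =>
      rw [List.tail_cons, zip_adjRep, adjRep]
      simp

-- the elif-chain classes A's loop actually tests
def cls1B (c : Char) : Bool := !PySem.Chars.islower c && PySem.Chars.isupper c
def cls2B (c : Char) : Bool := !PySem.Chars.islower c && !PySem.Chars.isupper c && PySem.Chars.isdigit c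

theorem flagsLoopA_char (cs : List Char) (f0 f1 f2 f3 : Int) (prev : Option Char) :
    flagsLoopA cs (f0, f1, f2, f3) prev =
      if adjRep prev cs then none
      else some (if cs.any PySem.Chars.islower then 1 else f0,
                 if cs.any cls1B then 1 else f1,
                 if cs.any cls2B then 1 else f2,
                 if cs.any specialB then 1 else f3) := by
  induction cs generalizing f0 f1 f2 f3 prev with
  | nil => simp [flagsLoopA, adjRep]
  | cons c cs ih =>
      simp only [flagsLoopA, adjRep]
      by_cases hp : some c = prev
      · simp [hp]
      · have hp' : (some c == prev) = false := by simp [hp]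
        simp only [hp', Bool.false_or, if_neg hp]
        by_cases h0 : PySem.Chars.islower c
        · simp [h0, ih, cls1B, cls2B, specialB]
        · by_cases h1 : PySem.Chars.isupper c
          · simp [h0, h1, ih, cls1B, cls2B, specialB]
          · by_cases h2 : PySem.Chars.isdigit c
            · simp [h0, h1, h2, ih, cls1B, cls2B, specialB]
            · simp [h0, h1, h2, ih, cls1B, cls2B, specialB]

-- the single-character classes are mutually exclusive, so the elif classes are the plain ones
theorem cls1B_eq (c : Char) : cls1B c = PySem.Chars.isupper c := by
  unfold cls1B
  simp [PySem.Chars.islower, PySem.Chars.isupper, Char.le_def]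
  intro h1 h2
  simp only [UInt32.lt_iff_toNat_lt, UInt32.le_iff_toNat_le, UInt32.toNat_ofNat] at *
  omega

theorem cls2B_eq (c : Char) : cls2B c = PySem.Chars.isdigit c := by
  unfold cls2B
  simp [PySem.Chars.islower, PySem.Chars.isupper, PySem.Chars.isdigit, Char.le_def]
  intro h1 h2
  simp only [UInt32.lt_iff_toNat_lt, UInt32.le_iff_toNat_le, UInt32.toNat_ofNat] at *
  omega

-- ===== VERDICT (by name: the statement is the Claim_ definition above) =====
theorem ppo_spec : Claim_equal_ppo := by
  intro pas old _
  unfold Spec_ppo ppo ppo_alt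
  have e1 : cls1B = PySem.Chars.isupper := funext cls1B_eq
  have e2 : cls2B = PySem.Chars.isdigit := funext cls2B_eq
  rw [if_neg (by omega), flagsLoopA_char, e1, e2, isderivable_eq, ← zip_adjRep']
  by_cases har : (pas.toList.zip pas.toList.tail).any (fun p => p.1 == p.2) <;>
  by_cases hL : pas.toList.any PySem.Chars.islower <;>
  by_cases hU : pas.toList.any PySem.Chars.isupper <;>
  by_cases hD : pas.toList.any PySem.Chars.isdigit <;>
  by_cases hS : pas.toList.any specialB <;>
  by_cases hd : isderivableB pas.toList old.toList <;>
  simp [har, hL, hU, hD, hS, hd]
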